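-- pv_equiv track=rewrite | github.com/OzCog/language-learning | src/parse_evaluator/parse_evaluator.py | Get_Parses
-- ===== SOURCE A (Python) =====
-- def Get_Parses(data):
--     """
--         Reads parses from data, counting number of parses by newlines
--         - sentences: list with tokenized sentences in data
--         - parses: a list of lists containing the split links of each parse
--         [
--           [[link1-parse1][link2-parse1] ... ]
--           [[link1-parse2][link2-parse2] ... ]
--           ...
--         ]
--         Each list is splitted into tokens using space.
--     """
--     parses = []
--     sentences = []
--     parse_num = -1
--     new_flag = True
--     for line in data:
--         if line == "\n":
--             # get rid of sentences with no links
--             new_flag = True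
--             continue
--         if new_flag:
--             new_flag = False
--             sentences.append(line.split())
--             parses.append([])
--             parse_num += 1
--             continue
--         parses[parse_num].append(line.split())
--
--     return parses, sentences
-- ===== SOURCE B (Python) =====
-- def Get_Parses(data):
--     """Group lines into maximal blocks of non-"\n" lines, then build both
--     outputs from the blocks: first line of a block is the sentence, the
--     rest are that parse's links."""
--     blocks = []
--     rest = data
--     while rest:
--         head, rest = rest[0], rest[1:]
--         if head == "\n":
--             continue
--         k = 0
--         while k < len(rest) and rest[k] != "\n":
--             k += 1
--         blocks.append([head] + rest[:k])
--         rest = rest[k:]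
--     parses = [[line.split() for line in b[1:]] for b in blocks]
--     sentences = [b[0].split() for b in blocks]
--     return parses, sentences
-- ===== Notes on version B (the rewrite author's own statement) =====
-- stated objective: alternative
-- what changed: Replaces the flag-and-running-index flat loop with a two-phase algorithm: first split the input into maximal blocks of non-blank lines with a block scanner, then build parses and sentences from each block by comprehensions (block head = sentence, tail = links).
import Mathlib
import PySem

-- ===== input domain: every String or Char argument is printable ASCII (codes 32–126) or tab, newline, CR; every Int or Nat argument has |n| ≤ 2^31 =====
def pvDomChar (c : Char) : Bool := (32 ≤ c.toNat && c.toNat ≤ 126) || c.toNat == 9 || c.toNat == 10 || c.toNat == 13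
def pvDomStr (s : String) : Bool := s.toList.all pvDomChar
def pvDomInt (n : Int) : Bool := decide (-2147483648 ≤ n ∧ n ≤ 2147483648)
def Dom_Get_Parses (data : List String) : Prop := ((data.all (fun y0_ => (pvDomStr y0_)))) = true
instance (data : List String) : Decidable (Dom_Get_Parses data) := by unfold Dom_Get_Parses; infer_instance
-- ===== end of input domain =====

-- B replaces A's flag-driven flat loop by a two-phase algorithm (split into blocks, then map); alternative decomposition, same cost.

-- ===== PORT A =====
-- parses[parse_num].append(x): Python index semantics (negative wraps; out of range would
-- raise IndexError — A's loop invariant keeps the index in range, so the identity fallback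
-- is never reached on A's actual states).
def pvAppendAt {α : Type} (xs : List α) (i : Int) (f : α → α) : List α :=
  let j : Int := if i < 0 then i + xs.length else i
  if 0 ≤ j ∧ j < xs.length then xs.modify j.toNat f else xs

-- one iteration of A's for-loop; state = (parses, sentences, parse_num, new_flag)
def pvStepA (st : List (List (List String)) × List (List String) × Int × Bool) (line : String) :
    List (List (List String)) × List (List String) × Int × Bool :=
  if line = "\n" then (st.1, st.2.1, st.2.2.1, true)
  else if st.2.2.2 then
    (st.1 ++ [[]], st.2.1 ++ [PySem.Str.split₀ line], st.2.2.1 + 1, false)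
  else
    (pvAppendAt st.1 st.2.2.1 (· ++ [PySem.Str.split₀ line]), st.2.1, st.2.2.1, st.2.2.2)

def Get_Parses (data : List String) : List (List (List String)) × List (List String) :=
  let st := data.foldl pvStepA ([], [], -1, true)
  (st.1, st.2.1)

-- ===== PORT B =====
-- the outer while-loop of Source B: split data into maximal blocks of non-"\n" lines
def pvBlocks : List String → List (List String)
  | [] => []
  | head :: rest =>
    if head = "\n" then pvBlocks rest
    else (head :: rest.takeWhile (fun l => l ≠ "\n")) :: pvBlocks (rest.dropWhile (fun l => l ≠ "\n"))
  termination_by l => l.length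
  decreasing_by
  · simp
  · simp only [List.length_cons]
    exact Nat.lt_succ_of_le (List.length_dropWhile_le _ _)

def Get_Parses_alt (data : List String) : List (List (List String)) × List (List String) :=
  let blocks := pvBlocks data
  (blocks.map (fun b => (b.drop 1).map PySem.Str.split₀),
   blocks.map (fun b => PySem.Str.split₀ (b.headD "")))  -- b[0]: every block is nonempty by construction

-- ===== PRECONDITION & SPEC =====
def Spec_Get_Parses (data : List String) (out : List (List (List String)) × List (List String)) : Prop := out = Get_Parses_alt data
instance (data : List String) (out : List (List (List String)) × List (List String)) : Decidable (Spec_Get_Parses data out) := by unfold Spec_Get_Parses; infer_instance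

-- ===== CLAIM (what is proved, stated in full; the proofs are below) =====
def Claim_equal_Get_Parses : Prop := ∀ (data : List String), Dom_Get_Parses data → Spec_Get_Parses data (Get_Parses data)

-- ===== LEMMAS AND PROOFS =====

theorem pvAppendAt_append_singleton {α : Type} (P : List α) (c : α) (f : α → α) :
    pvAppendAt (P ++ [c]) (P.length : Int) f = P ++ [f c] := by
  unfold pvAppendAt
  simp only [List.length_append, List.length_cons, List.length_nil]
  have h0 : ¬ ((P.length : Int) < 0) := by omega
  rw [if_neg h0, if_pos (by push_cast; omega)]
  simp only [Int.toNat_natCast]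
  induction P with
  | nil => simp [List.modify]
  | cons p ps ihp => simpa [List.modify] using ihp

-- mid-block: with new_flag = false and parse_num pointing at the last parse,
-- the loop appends the split non-blank lines to that parse until a blank (or the end)
theorem pvFoldA_inblock (data : List String) :
    ∀ (c : List (List String)) (P : List (List (List String))) (S : List (List String)),
    data.foldl pvStepA (P ++ [c], S, (P.length : Int), false) =
    (data.dropWhile (fun l => l ≠ "\n")).foldl pvStepA
      (P ++ [c ++ (data.takeWhile (fun l => l ≠ "\n")).map PySem.Str.split₀], S, (P.length : Int), false) := by
  induction data with
  | nil => simp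
  | cons l ls ih =>
    intro c P S
    by_cases hl : l = "\n"
    · simp [hl]
    · simp only [List.foldl_cons, List.takeWhile_cons, List.dropWhile_cons, hl, decide_not]
      have hstep : pvStepA (P ++ [c], S, (P.length : Int), false) l =
          (P ++ [c ++ [PySem.Str.split₀ l]], S, (P.length : Int), false) := by
        simp [pvStepA, hl, pvAppendAt_append_singleton]
      rw [hstep, ih (c ++ [PySem.Str.split₀ l]) P S]
      simp

-- fresh state: the loop emits one block per maximal run of non-blank lines
theorem pvFoldA_fresh : ∀ (n : Nat) (data : List String), data.length ≤ n →
    ∀ (P : List (List (List String))) (S : List (List String)),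
    ((data.foldl pvStepA (P, S, (P.length : Int) - 1, true)).1,
     (data.foldl pvStepA (P, S, (P.length : Int) - 1, true)).2.1) =
    (P ++ (pvBlocks data).map (fun b => (b.drop 1).map PySem.Str.split₀),
     S ++ (pvBlocks data).map (fun b => PySem.Str.split₀ (b.headD ""))) := by
  intro n
  induction n with
  | zero =>
    intro data hlen P S
    have : data = [] := List.length_eq_zero_iff.mp (Nat.le_zero.mp hlen)
    subst this; simp [pvBlocks]
  | succ n ih =>
    intro data hlen P S
    match data with
    | [] => simp [pvBlocks]
    | l :: ls =>
      by_cases hl : l = "\n"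
      · have hstep : pvStepA (P, S, (P.length : Int) - 1, true) l = (P, S, (P.length : Int) - 1, true) := by
          simp [pvStepA, hl]
        rw [List.foldl_cons, hstep]
        have := ih ls (by simpa using Nat.lt_succ_iff.mp (Nat.lt_of_lt_of_le (by simp) hlen)) P S
        rw [this]
        simp [pvBlocks, hl]
      · have hstep : pvStepA (P, S, (P.length : Int) - 1, true) l =
            (P ++ [[]], S ++ [PySem.Str.split₀ l], (P.length : Int), false) := by
          simp [pvStepA, hl]
        rw [List.foldl_cons, hstep, pvFoldA_inblock ls [] P (S ++ [PySem.Str.split₀ l])]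
        simp only [List.nil_append]
        set T : List (List String) := (ls.takeWhile (fun l => l ≠ "\n")).map PySem.Str.split₀ with hT
        have hblk : pvBlocks (l :: ls) =
            (l :: ls.takeWhile (fun l => l ≠ "\n")) :: pvBlocks (ls.dropWhile (fun l => l ≠ "\n")) := by
          rw [pvBlocks]; simp [hl]
        match hdw : ls.dropWhile (fun l => l ≠ "\n") with
        | [] =>
          rw [hblk, hdw]
          simp [pvBlocks, hT]
        | d :: rest =>
          have hd : d = "\n" := by
            have h := List.head?_dropWhile_not (fun l => decide (l ≠ "\n")) ls
            rw [hdw] at h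
            simpa using h
          rw [List.foldl_cons]
          have hstep2 : pvStepA (P ++ [T], S ++ [PySem.Str.split₀ l], (P.length : Int), false) d =
              (P ++ [T], S ++ [PySem.Str.split₀ l], (P.length : Int), true) := by
            simp [pvStepA, hd]
          rw [hstep2]
          have hlen2 : rest.length ≤ n := by
            have h1 : (ls.dropWhile (fun l => l ≠ "\n")).length ≤ ls.length := List.length_dropWhile_le _ _
            rw [hdw] at h1; simp at h1
            simp at hlen; omega
          have hcast : (P.length : Int) = ((P ++ [T]).length : Int) - 1 := by simp
          rw [hcast]
          have := ih rest hlen2 (P ++ [T]) (S ++ [PySem.Str.split₀ l])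
          rw [this, hblk, hdw]
          have hpb : pvBlocks ("\n" :: rest) = pvBlocks rest := by rw [pvBlocks]; simp
          rw [hd, hpb]
          simp [hT]

-- ===== VERDICT (by name: the statement is the Claim_ definition above) =====
theorem Get_Parses_spec : Claim_equal_Get_Parses := by
  intro data _
  unfold Spec_Get_Parses Get_Parses Get_Parses_alt
  have := pvFoldA_fresh data.length data le_rfl [] []
  simp only [List.length_nil, Int.ofNat_zero, zero_sub, List.nil_append] at this
  have h1 := congrArg Prod.fst this
  have h2 := congrArg Prod.snd this
  simp only at h1 h2
  exact Prod.ext h1 h2
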